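-- pv_equiv track=rewrite | github.com/cerengultekin-coder/DraftCoach | apps/api/main.py | _hr_stats
-- ===== SOURCE A (Python) =====
-- def _hr_stats(timeseries: list) -> dict:
--     hrs = [p["hr"] for p in timeseries if p.get("hr") is not None]
--     if not hrs:
--         return {}
--     return {
--         "hr_min": int(min(hrs)),
--         "hr_max": int(max(hrs)),
--         "hr_avg": int(sum(hrs) / len(hrs)),
--     }
-- ===== SOURCE B (Python) =====
-- def _hr_stats(timeseries: list) -> dict:
--     # single pass maintaining running min/max/sum/count instead of building a list
--     count = 0
--     lo = hi = total = 0
--     for p in timeseries: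
--         hr = p.get("hr")
--         if hr is None:
--             continue
--         if count == 0:
--             lo = hr
--             hi = hr
--         else:
--             if hr < lo:
--                 lo = hr
--             if hr > hi:
--                 hi = hr
--         total += hr
--         count += 1
--     if count == 0:
--         return {}
--     return {"hr_min": int(lo), "hr_max": int(hi), "hr_avg": int(total / count)}
-- ===== Notes on version B (the rewrite author's own statement) =====
-- stated objective: alternative
-- what changed: Replaces the build-a-list comprehension plus three separate builtin passes (min, max, sum) with a single fold over the timeseries maintaining running count/lo/hi/total, returning {} when count stays 0.
import Mathlib
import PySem

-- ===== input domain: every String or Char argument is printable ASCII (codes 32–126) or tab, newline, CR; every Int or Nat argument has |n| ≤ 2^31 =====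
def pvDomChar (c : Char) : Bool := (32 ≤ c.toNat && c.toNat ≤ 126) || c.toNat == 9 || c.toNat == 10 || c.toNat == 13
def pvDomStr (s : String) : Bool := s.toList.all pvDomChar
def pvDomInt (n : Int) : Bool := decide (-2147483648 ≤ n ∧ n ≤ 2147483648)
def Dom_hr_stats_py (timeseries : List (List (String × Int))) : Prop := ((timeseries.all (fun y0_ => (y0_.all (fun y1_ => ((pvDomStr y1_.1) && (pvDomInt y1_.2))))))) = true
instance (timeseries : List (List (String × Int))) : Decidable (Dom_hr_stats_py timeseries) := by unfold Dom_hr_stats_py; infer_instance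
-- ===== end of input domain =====

-- B replaces A's comprehension plus three builtin passes (min/max/sum) by one fold keeping
-- running count/lo/hi/total; return values are identical (objective: alternative decomposition).

-- ===== PORT A =====
-- hrs = [p["hr"] for p in timeseries if p.get("hr") is not None]; then min/max/sum over hrs.
def hr_stats_py (timeseries : List (List (String × Int))) : List (String × Int) :=
  let hrs := timeseries.filterMap (fun p => (PySem.Dict.ofList p).get? "hr")
  if hrs = [] then []
  else
    [("hr_min", ((PySem.List.min? hrs (fun x => x)).getD 0)),
     ("hr_max", ((PySem.List.max? hrs (fun x => x)).getD 0)),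
     ("hr_avg", PySem.Int.truncdiv hrs.sum (hrs.length : Int))]

-- ===== PORT B =====
-- one step of B's loop: state = (count, lo, hi, total)
def hrStep (st : Int × Int × Int × Int) (p : List (String × Int)) : Int × Int × Int × Int :=
  match (PySem.Dict.ofList p).get? "hr" with
  | none => st
  | some hr =>
    let (count, lo, hi, total) := st
    if count = 0 then (1, hr, hr, total + hr)
    else (count + 1, if hr < lo then hr else lo, if hr > hi then hr else hi, total + hr)

def hr_stats_py_alt (timeseries : List (List (String × Int))) : List (String × Int) :=
  let st := timeseries.foldl hrStep (0, 0, 0, 0)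
  if st.1 = 0 then []
  else [("hr_min", st.2.1), ("hr_max", st.2.2.1), ("hr_avg", PySem.Int.truncdiv st.2.2.2 st.1)]

-- ===== PRECONDITION & SPEC =====
def Spec_hr_stats_py (timeseries : List (List (String × Int))) (out : List (String × Int)) : Prop := out = hr_stats_py_alt timeseries
instance (timeseries : List (List (String × Int))) (out : List (String × Int)) : Decidable (Spec_hr_stats_py timeseries out) := by unfold Spec_hr_stats_py; infer_instance

-- ===== CLAIM (what is proved, stated in full; the proofs are below) =====
def Claim_equal_hr_stats_py : Prop := ∀ (timeseries : List (List (String × Int))), Dom_hr_stats_py timeseries → Spec_hr_stats_py timeseries (hr_stats_py timeseries)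

-- ===== LEMMAS AND PROOFS =====

-- B's loop body specialised to an already-extracted hr value (proof-only helper)
def valStep (st : Int × Int × Int × Int) (hr : Int) : Int × Int × Int × Int :=
  let (count, lo, hi, total) := st
  if count = 0 then (1, hr, hr, total + hr)
  else (count + 1, if hr < lo then hr else lo, if hr > hi then hr else hi, total + hr)

-- B's fold over the timeseries is a fold over the extracted hr values
theorem foldl_hrStep_eq (timeseries : List (List (String × Int))) (st : Int × Int × Int × Int) :
    timeseries.foldl hrStep st =
      (timeseries.filterMap (fun p => (PySem.Dict.ofList p).get? "hr")).foldl valStep st := by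
  induction timeseries generalizing st with
  | nil => rfl
  | cons p t ih =>
    simp only [List.foldl_cons, List.filterMap_cons]
    cases h : (PySem.Dict.ofList p).get? "hr" with
    | none => rw [ih]; congr 1; simp [hrStep, h]
    | some hr =>
      rw [List.foldl_cons, ih]
      congr 1
      simp [hrStep, valStep, h]

-- characterisation of B's fold over a nonempty value list started from a positive count
theorem foldl_step_char (t : List Int) (c lo hi total : Int) (hc : 0 < c) :
    t.foldl valStep (c, lo, hi, total) =
      (c + t.length, t.foldl min lo, t.foldl max hi, total + t.sum) := by
  induction t generalizing c lo hi total with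
  | nil => simp
  | cons x xs ih =>
    have hc' : ¬ c = 0 := by omega
    rw [List.foldl_cons, show valStep (c, lo, hi, total) x =
      (c + 1, if x < lo then x else lo, if x > hi then x else hi, total + x) by simp [valStep, hc'],
      ih (c + 1) _ _ _ (by omega)]
    have hmin : (if x < lo then x else lo) = min lo x := by split_ifs with h <;> omega
    have hmax : (if x > hi then x else hi) = max hi x := by split_ifs with h <;> omega
    rw [hmin, hmax]
    simp [List.length_cons, List.sum_cons]
    constructor
    · omega
    · ring

theorem hr_stats_py_spec : Claim_equal_hr_stats_py := by
  intro timeseries _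
  unfold Spec_hr_stats_py hr_stats_py hr_stats_py_alt
  rw [foldl_hrStep_eq]
  cases h : timeseries.filterMap (fun p => (PySem.Dict.ofList p).get? "hr") with
  | nil => simp
  | cons x t =>
    rw [if_neg (by simp : ¬ (x :: t) = []), List.foldl_cons,
      show valStep (0, 0, 0, 0) x = (1, x, x, 0 + x) from rfl,
      foldl_step_char t 1 x x (0 + x) (by omega)]
    have h1 : (1 : Int) + t.length ≠ 0 := by
      have : (0 : Int) ≤ (t.length : Int) := Int.natCast_nonneg _
      omega
    simp only [h1, if_false]
    rw [PySem.List.min?_id_cons, PySem.List.max?_id_cons]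
    simp only [Option.getD_some, List.length_cons, List.sum_cons]
    have : ((t.length + 1 : Nat) : Int) = 1 + (t.length : Int) := by push_cast; ring
    rw [this]
    have : x + t.sum = 0 + x + t.sum := by ring
    rw [← this]
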